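-- pv_equiv track=rewrite | github.com/hegdermrs/scantron | omr_api.py | summarize_answers
-- ===== SOURCE A (Python) =====
-- ACT_CONFIDENT_ANSWERS = {"A", "B", "C", "D", "F", "G", "H", "J"}
--
-- def summarize_answers(answers):
--     summary = {
--         "confident_count": 0,
--         "multiple_count": 0,
--         "blank_count": 0,
--         "unclear_count": 0,
--     }
--
--     for answer in answers.values():
--         if answer in ACT_CONFIDENT_ANSWERS:
--             summary["confident_count"] += 1
--         elif answer == "multiple":
--             summary["multiple_count"] += 1
--         elif answer == "blank":
--             summary["blank_count"] += 1
--         else: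
--             summary["unclear_count"] += 1
--
--     return summary
-- ===== SOURCE B (Python) =====
-- ACT_CONFIDENT_ANSWERS = {"A", "B", "C", "D", "F", "G", "H", "J"}
--
-- def summarize_answers(answers):
--     vals = list(answers.values())
--     confident_count = sum(1 for a in vals if a in ACT_CONFIDENT_ANSWERS)
--     multiple_count = sum(1 for a in vals if a == "multiple")
--     blank_count = sum(1 for a in vals if a == "blank")
--     return {
--         "confident_count": confident_count,
--         "multiple_count": multiple_count,
--         "blank_count": blank_count,
--         "unclear_count": len(vals) - confident_count - multiple_count - blank_count,
--     }
-- ===== Notes on version B (the rewrite author's own statement) =====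
-- stated objective: alternative
-- what changed: Replaces the single if/elif classification loop over a mutable dict with three independent counting passes over the values plus a subtraction that derives unclear_count as the complement.
import Mathlib
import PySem

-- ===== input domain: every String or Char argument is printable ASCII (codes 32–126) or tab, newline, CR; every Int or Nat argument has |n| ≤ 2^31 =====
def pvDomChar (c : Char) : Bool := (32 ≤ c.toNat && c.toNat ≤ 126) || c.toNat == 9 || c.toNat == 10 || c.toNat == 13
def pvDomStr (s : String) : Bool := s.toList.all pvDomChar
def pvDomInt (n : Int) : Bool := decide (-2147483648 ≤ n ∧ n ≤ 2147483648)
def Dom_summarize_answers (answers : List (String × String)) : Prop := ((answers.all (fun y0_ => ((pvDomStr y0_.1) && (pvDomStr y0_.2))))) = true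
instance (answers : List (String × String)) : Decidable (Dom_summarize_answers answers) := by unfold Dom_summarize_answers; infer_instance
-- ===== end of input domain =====

-- B replaces A's single if/elif loop over a mutable dict with three independent
-- counting passes over the values plus a subtraction for unclear_count (alternative decomposition).


-- ===== PORT A =====
def ACT_CONFIDENT_ANSWERS : List String := PySem.Set.ofList ["A", "B", "C", "D", "F", "G", "H", "J"]

def summarize_answers (answers : List (String × String)) : List (String × Int) :=
  let summary : PySem.Dict String Int :=
    ((((PySem.Dict.empty.insert "confident_count" 0).insert "multiple_count" 0).insert
        "blank_count" 0).insert "unclear_count" 0)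
  let summary := answers.foldl (fun s kv =>
    let answer := kv.2
    if answer ∈ ACT_CONFIDENT_ANSWERS then s.modify "confident_count" 0 (· + 1)
    else if answer = "multiple" then s.modify "multiple_count" 0 (· + 1)
    else if answer = "blank" then s.modify "blank_count" 0 (· + 1)
    else s.modify "unclear_count" 0 (· + 1)) summary
  summary.items

-- ===== PORT B =====
def summarize_answers_alt (answers : List (String × String)) : List (String × Int) :=
  let vals := answers.map (·.2)
  let confident_count : Int := vals.countP (fun a => a ∈ ACT_CONFIDENT_ANSWERS)
  let multiple_count : Int := vals.countP (fun a => a = "multiple")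
  let blank_count : Int := vals.countP (fun a => a = "blank")
  [("confident_count", confident_count),
   ("multiple_count", multiple_count),
   ("blank_count", blank_count),
   ("unclear_count", (vals.length : Int) - confident_count - multiple_count - blank_count)]

-- ===== PRECONDITION & SPEC =====
def Spec_summarize_answers (answers : List (String × String)) (out : List (String × Int)) : Prop := out = summarize_answers_alt answers
instance (answers : List (String × String)) (out : List (String × Int)) : Decidable (Spec_summarize_answers answers out) := by unfold Spec_summarize_answers; infer_instance

-- ===== CLAIM (what is proved, stated in full; the proofs are below) =====
def Claim_equal_summarize_answers : Prop := ∀ (answers : List (String × String)), Dom_summarize_answers answers → Spec_summarize_answers answers (summarize_answers answers)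

-- ===== LEMMAS AND PROOFS =====

-- the loop invariant: folding A's step over any tail from a literal-shaped summary dict
lemma summarize_loop (l : List (String × String)) (c m b u : Int) :
    (l.foldl (fun s kv =>
      let answer := kv.2
      if answer ∈ ACT_CONFIDENT_ANSWERS then s.modify "confident_count" 0 (· + 1)
      else if answer = "multiple" then s.modify "multiple_count" 0 (· + 1)
      else if answer = "blank" then s.modify "blank_count" 0 (· + 1)
      else s.modify "unclear_count" 0 (· + 1))
      (PySem.Dict.mk [("confident_count", c), ("multiple_count", m),
                      ("blank_count", b), ("unclear_count", u)])).items
    = [("confident_count", c + ((l.map (·.2)).countP (fun a => a ∈ ACT_CONFIDENT_ANSWERS) : Int)),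
       ("multiple_count", m + ((l.map (·.2)).countP (fun a => a = "multiple") : Int)),
       ("blank_count", b + ((l.map (·.2)).countP (fun a => a = "blank") : Int)),
       ("unclear_count", u + (((l.map (·.2)).length : Int)
          - ((l.map (·.2)).countP (fun a => a ∈ ACT_CONFIDENT_ANSWERS) : Int)
          - ((l.map (·.2)).countP (fun a => a = "multiple") : Int)
          - ((l.map (·.2)).countP (fun a => a = "blank") : Int)))] := by
  induction l generalizing c m b u with
  | nil => simp
  | cons kv t ih =>
    obtain ⟨k, a⟩ := kv
    by_cases hc : a ∈ ACT_CONFIDENT_ANSWERS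
    · have ham : a ≠ "multiple" := by
        rcases (by simpa [ACT_CONFIDENT_ANSWERS, PySem.Set.ofList] using hc) with
          rfl | rfl | rfl | rfl | rfl | rfl | rfl | rfl <;> decide
      have hab : a ≠ "blank" := by
        rcases (by simpa [ACT_CONFIDENT_ANSWERS, PySem.Set.ofList] using hc) with
          rfl | rfl | rfl | rfl | rfl | rfl | rfl | rfl <;> decide
      have hstep :
          (PySem.Dict.mk [("confident_count", c), ("multiple_count", m),
              ("blank_count", b), ("unclear_count", u)]).modify "confident_count" 0 (· + 1)
          = PySem.Dict.mk [("confident_count", c + 1), ("multiple_count", m),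
              ("blank_count", b), ("unclear_count", u)] := by
        simp [PySem.Dict.modify, PySem.Dict.insert, PySem.Dict.getD, PySem.Dict.get?,
          PySem.Dict.contains]
      simp only [List.foldl_cons]
      rw [if_pos hc, hstep, ih]
      simp [hc, ham, hab]
      omega
    · by_cases hm : a = "multiple"
      · have hstep :
            (PySem.Dict.mk [("confident_count", c), ("multiple_count", m),
                ("blank_count", b), ("unclear_count", u)]).modify "multiple_count" 0 (· + 1)
            = PySem.Dict.mk [("confident_count", c), ("multiple_count", m + 1),
                ("blank_count", b), ("unclear_count", u)] := by
          simp [PySem.Dict.modify, PySem.Dict.insert, PySem.Dict.getD, PySem.Dict.get?,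
            PySem.Dict.contains]
        subst hm
        simp only [List.foldl_cons]
        rw [if_neg hc]
        simp only [reduceIte]
        rw [hstep, ih]
        simp [hc]
        omega
      · by_cases hb : a = "blank"
        · have hstep :
              (PySem.Dict.mk [("confident_count", c), ("multiple_count", m),
                  ("blank_count", b), ("unclear_count", u)]).modify "blank_count" 0 (· + 1)
              = PySem.Dict.mk [("confident_count", c), ("multiple_count", m),
                  ("blank_count", b + 1), ("unclear_count", u)] := by
            simp [PySem.Dict.modify, PySem.Dict.insert, PySem.Dict.getD, PySem.Dict.get?,
              PySem.Dict.contains]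
          subst hb
          simp only [List.foldl_cons]
          rw [if_neg hc, if_neg hm]
          simp only [reduceIte]
          rw [hstep, ih]
          simp [hc]
          omega
        · have hstep :
              (PySem.Dict.mk [("confident_count", c), ("multiple_count", m),
                  ("blank_count", b), ("unclear_count", u)]).modify "unclear_count" 0 (· + 1)
              = PySem.Dict.mk [("confident_count", c), ("multiple_count", m),
                  ("blank_count", b), ("unclear_count", u + 1)] := by
            simp [PySem.Dict.modify, PySem.Dict.insert, PySem.Dict.getD, PySem.Dict.get?,
              PySem.Dict.contains]
          simp only [List.foldl_cons]
          rw [if_neg hc, if_neg hm, if_neg hb, hstep, ih]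
          simp [hc, hm, hb]
          omega

-- ===== VERDICT (by name: the statement is the Claim_ definition above) =====
theorem summarize_answers_spec : Claim_equal_summarize_answers := by
  intro answers _
  show summarize_answers answers = summarize_answers_alt answers
  unfold summarize_answers summarize_answers_alt
  have hinit :
      ((((PySem.Dict.empty.insert "confident_count" (0:Int)).insert "multiple_count" 0).insert
          "blank_count" 0).insert "unclear_count" 0)
      = PySem.Dict.mk [("confident_count", 0), ("multiple_count", 0),
          ("blank_count", 0), ("unclear_count", 0)] := by
    simp [PySem.Dict.empty, PySem.Dict.insert, PySem.Dict.contains]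
  rw [hinit, summarize_loop]
  simp
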